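-- pv_equiv track=rewrite | github.com/RythmSharma96/safe-ai-learning | backend/conversations/services.py | _get_canned_response
-- ===== SOURCE A (Python) =====
-- SAFE_RESPONSES = {
--     "self_harm": (
--         "I care about you and want you to be safe. If you're going through a tough time, "
--         "please talk to a trusted adult like a parent, teacher, or school counselor. "
--         "You can also call Kids Helpline at 1800 55 1800. "
--         "I'm here to help you learn — let's focus on something positive together!"
--     ),
--     "pii_request": (
--         "I'm not able to share or receive personal information like phone numbers, "
--         "emails, or addresses. This is to keep everyone safe! "
--         "Is there a learning topic I can help you with instead?"
--     ),
--     "sexual_content": (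
--         "That's not something I'm able to help with. "
--         "Let's talk about something fun to learn instead! "
--         "Do you have any questions about science, math, history, or another subject?"
--     ),
--     "manipulation": (
--         "I want to make sure you stay safe. If anyone ever makes you feel uncomfortable "
--         "or asks you to keep secrets from your parents or teachers, please tell a trusted adult. "
--         "Now, what would you like to learn about today?"
--     ),
--     "moderation_unavailable": (
--         "I need a moment — could you try asking your question again? "
--         "I'm here to help you learn!"
--     ),
-- }
--
-- DEFAULT_SAFE_RESPONSE = (
--     "I'm not able to help with that, but I'd love to help you learn something new! "
--     "What subject are you curious about?"
-- )
--
-- def _get_canned_response(categories: list[str]) -> str: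
--     """Get the most appropriate canned response based on flag categories."""
--     priority = ["self_harm", "sexual_content", "pii_request", "manipulation"]
--     for cat in priority:
--         if cat in categories:
--             return SAFE_RESPONSES[cat]
--
--     if "moderation_unavailable" in categories:
--         return SAFE_RESPONSES["moderation_unavailable"]
--
--     return DEFAULT_SAFE_RESPONSE
-- ===== SOURCE B (Python) =====
-- SAFE_RESPONSES = {
--     "self_harm": (
--         "I care about you and want you to be safe. If you're going through a tough time, "
--         "please talk to a trusted adult like a parent, teacher, or school counselor. "
--         "You can also call Kids Helpline at 1800 55 1800. "
--         "I'm here to help you learn — let's focus on something positive together!"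
--     ),
--     "pii_request": (
--         "I'm not able to share or receive personal information like phone numbers, "
--         "emails, or addresses. This is to keep everyone safe! "
--         "Is there a learning topic I can help you with instead?"
--     ),
--     "sexual_content": (
--         "That's not something I'm able to help with. "
--         "Let's talk about something fun to learn instead! "
--         "Do you have any questions about science, math, history, or another subject?"
--     ),
--     "manipulation": (
--         "I want to make sure you stay safe. If anyone ever makes you feel uncomfortable "
--         "or asks you to keep secrets from your parents or teachers, please tell a trusted adult. "
--         "Now, what would you like to learn about today?"
--     ),
--     "moderation_unavailable": (
--         "I need a moment — could you try asking your question again? "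
--         "I'm here to help you learn!"
--     ),
-- }
--
-- DEFAULT_SAFE_RESPONSE = (
--     "I'm not able to help with that, but I'd love to help you learn something new! "
--     "What subject are you curious about?"
-- )
--
-- _RANK = {
--     "self_harm": 0,
--     "sexual_content": 1,
--     "pii_request": 2,
--     "manipulation": 3,
--     "moderation_unavailable": 4,
-- }
--
-- def _get_canned_response(categories: list) -> str:
--     """Single pass over the input, keeping the known category of smallest rank."""
--     best = None
--     best_rank = None
--     for cat in categories:
--         r = _RANK.get(cat)
--         if r is not None and (best_rank is None or r < best_rank):
--             best, best_rank = cat, r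
--     return SAFE_RESPONSES[best] if best is not None else DEFAULT_SAFE_RESPONSE
-- ===== Notes on version B (the rewrite author's own statement) =====
-- stated objective: alternative
-- what changed: Replaces A's early-return scan over the fixed priority list (membership test per priority category) with a single pass over the input list that keeps the category of smallest rank from a prebuilt rank table.
import Mathlib
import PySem

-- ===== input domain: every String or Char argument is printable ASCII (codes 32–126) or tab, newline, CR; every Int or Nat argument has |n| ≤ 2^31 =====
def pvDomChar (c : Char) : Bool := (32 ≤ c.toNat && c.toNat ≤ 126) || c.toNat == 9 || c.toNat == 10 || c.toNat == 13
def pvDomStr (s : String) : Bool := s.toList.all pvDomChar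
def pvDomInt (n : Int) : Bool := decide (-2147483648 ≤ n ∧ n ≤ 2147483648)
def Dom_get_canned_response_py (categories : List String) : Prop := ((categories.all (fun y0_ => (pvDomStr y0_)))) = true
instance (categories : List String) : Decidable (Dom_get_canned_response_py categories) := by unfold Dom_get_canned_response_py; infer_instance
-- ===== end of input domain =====

-- B replaces A's early-return scan over the fixed priority list by a single pass over the
-- input that keeps the known category of smallest rank (objective: alternative shape, same cost).

-- shared module constants (the SAFE_RESPONSES dict values and DEFAULT_SAFE_RESPONSE)
def pvRespSelfHarm : String := "I care about you and want you to be safe. If you're going through a tough time, please talk to a trusted adult like a parent, teacher, or school counselor. You can also call Kids Helpline at 1800 55 1800. I'm here to help you learn — let's focus on something positive together!"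
def pvRespPii : String := "I'm not able to share or receive personal information like phone numbers, emails, or addresses. This is to keep everyone safe! Is there a learning topic I can help you with instead?"
def pvRespSexual : String := "That's not something I'm able to help with. Let's talk about something fun to learn instead! Do you have any questions about science, math, history, or another subject?"
def pvRespManip : String := "I want to make sure you stay safe. If anyone ever makes you feel uncomfortable or asks you to keep secrets from your parents or teachers, please tell a trusted adult. Now, what would you like to learn about today?"
def pvRespMod : String := "I need a moment — could you try asking your question again? I'm here to help you learn!"
def pvDefaultResp : String := "I'm not able to help with that, but I'd love to help you learn something new! What subject are you curious about?"

-- SAFE_RESPONSES[cat] lookup (called only with the five keys present in the dict)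
def pvSafeResp (c : String) : String :=
  if c = "self_harm" then pvRespSelfHarm
  else if c = "pii_request" then pvRespPii
  else if c = "sexual_content" then pvRespSexual
  else if c = "manipulation" then pvRespManip
  else if c = "moderation_unavailable" then pvRespMod
  else ""

-- ===== PORT A =====
-- 'for cat in priority: if cat in categories: return SAFE_RESPONSES[cat]'
def pvALoop (categories : List String) : List String → Option String
  | [] => none
  | c :: rest => if categories.contains c then some (pvSafeResp c) else pvALoop categories rest

def get_canned_response_py (categories : List String) : String :=
  match pvALoop categories ["self_harm", "sexual_content", "pii_request", "manipulation"] with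
  | some r => r
  | none =>
    if categories.contains "moderation_unavailable" then pvSafeResp "moderation_unavailable"
    else pvDefaultResp

-- ===== PORT B =====
-- _RANK.get(cat)
def pvRank (c : String) : Option Nat :=
  if c = "self_harm" then some 0
  else if c = "sexual_content" then some 1
  else if c = "pii_request" then some 2
  else if c = "manipulation" then some 3
  else if c = "moderation_unavailable" then some 4
  else none

-- the loop body: (best, best_rank) updated by one cat
def pvStep (best : Option (String × Nat)) (c : String) : Option (String × Nat) :=
  match pvRank c, best with
  | none, b => b
  | some r, none => some (c, r)
  | some r, some (bc, br) => if r < br then some (c, r) else some (bc, br)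

def pvBLoop : List String → Option (String × Nat) → Option (String × Nat)
  | [], best => best
  | c :: rest, best => pvBLoop rest (pvStep best c)

def get_canned_response_py_alt (categories : List String) : String :=
  match pvBLoop categories none with
  | some (c, _) => pvSafeResp c
  | none => pvDefaultResp

-- ===== PRECONDITION & SPEC =====
def Spec_get_canned_response_py (categories : List String) (out : String) : Prop := out = get_canned_response_py_alt categories
instance (categories : List String) (out : String) : Decidable (Spec_get_canned_response_py categories out) := by unfold Spec_get_canned_response_py; infer_instance

-- ===== CLAIM (what is proved, stated in full; the proofs are below) =====
def Claim_equal_get_canned_response_py : Prop := ∀ (categories : List String), Dom_get_canned_response_py categories → Spec_get_canned_response_py categories (get_canned_response_py categories)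

-- ===== LEMMAS AND PROOFS =====

-- left-biased 'keep the better of two states'
def pvComb : Option (String × Nat) → Option (String × Nat) → Option (String × Nat)
  | b, none => b
  | none, some x => some x
  | some (bc, br), some (xc, xr) => if xr < br then some (xc, xr) else some (bc, br)

lemma pvComb_assoc (a b c : Option (String × Nat)) :
    pvComb (pvComb a b) c = pvComb a (pvComb b c) := by
  rcases a with _ | ⟨ac, ar⟩ <;> rcases b with _ | ⟨bc, br⟩ <;> rcases c with _ | ⟨cc, cr⟩ <;>
    simp only [pvComb] <;> split_ifs <;> simp only [pvComb] <;> split_ifs <;>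
      first | rfl | (exfalso; omega)

lemma pvComb_none_left (x : Option (String × Nat)) : pvComb none x = x := by
  cases x <;> rfl

lemma pvStep_comb (b : Option (String × Nat)) (c : String) :
    pvStep b c = pvComb b (pvStep none c) := by
  rcases b with _ | ⟨bc, br⟩ <;> cases hr : pvRank c <;> simp [pvStep, pvComb, hr]

lemma pvBLoop_state (l : List String) : ∀ b, pvBLoop l b = pvComb b (pvBLoop l none) := by
  induction l with
  | nil => intro b; rfl
  | cons c rest ih =>
    intro b
    show pvBLoop rest (pvStep b c) = pvComb b (pvBLoop rest (pvStep none c))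
    rw [ih (pvStep b c), ih (pvStep none c), pvStep_comb, pvComb_assoc]

-- the first-in-priority-order member, as A's chain of membership tests produces it
def pvBest (l : List String) : Option (String × Nat) :=
  if l.contains "self_harm" then some ("self_harm", 0)
  else if l.contains "sexual_content" then some ("sexual_content", 1)
  else if l.contains "pii_request" then some ("pii_request", 2)
  else if l.contains "manipulation" then some ("manipulation", 3)
  else if l.contains "moderation_unavailable" then some ("moderation_unavailable", 4)
  else none

lemma pvBLoop_eq_best (l : List String) : pvBLoop l none = pvBest l := by
  induction l with
  | nil => rfl
  | cons c rest ih =>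
    show pvBLoop rest (pvStep none c) = pvBest (c :: rest)
    rw [pvBLoop_state, ih]
    by_cases h0 : c = "self_harm"
    · subst h0
      rw [show pvStep none "self_harm" = some ("self_harm", 0) from rfl]
      simp only [pvBest, List.contains_cons, beq_self_eq_true, Bool.true_or]
      split_ifs <;> rfl
    by_cases h1 : c = "sexual_content"
    · subst h1
      rw [show pvStep none "sexual_content" = some ("sexual_content", 1) from rfl]
      simp only [pvBest, List.contains_cons, beq_self_eq_true, Bool.true_or,
        String.reduceBEq, Bool.false_or]
      split_ifs <;> rfl
    by_cases h2 : c = "pii_request"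
    · subst h2
      rw [show pvStep none "pii_request" = some ("pii_request", 2) from rfl]
      simp only [pvBest, List.contains_cons, beq_self_eq_true, Bool.true_or,
        String.reduceBEq, Bool.false_or]
      split_ifs <;> rfl
    by_cases h3 : c = "manipulation"
    · subst h3
      rw [show pvStep none "manipulation" = some ("manipulation", 3) from rfl]
      simp only [pvBest, List.contains_cons, beq_self_eq_true, Bool.true_or,
        String.reduceBEq, Bool.false_or]
      split_ifs <;> rfl
    by_cases h4 : c = "moderation_unavailable"
    · subst h4
      rw [show pvStep none "moderation_unavailable" = some ("moderation_unavailable", 4) from rfl]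
      simp only [pvBest, List.contains_cons, beq_self_eq_true, Bool.true_or,
        String.reduceBEq, Bool.false_or]
      split_ifs <;> rfl
    · have hrk : pvRank c = none := by simp [pvRank, h0, h1, h2, h3, h4]
      have hst : pvStep none c = none := by simp [pvStep, hrk]
      rw [hst, pvComb_none_left]
      have b0 : ("self_harm" == c) = false := by simp [Ne.symm h0]
      have b1 : ("sexual_content" == c) = false := by simp [Ne.symm h1]
      have b2 : ("pii_request" == c) = false := by simp [Ne.symm h2]
      have b3 : ("manipulation" == c) = false := by simp [Ne.symm h3]
      have b4 : ("moderation_unavailable" == c) = false := by simp [Ne.symm h4]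
      simp only [pvBest, List.contains_cons, b0, b1, b2, b3, b4, Bool.false_or]

-- ===== VERDICT (by name: the statement is the Claim_ definition above) =====
theorem get_canned_response_py_spec : Claim_equal_get_canned_response_py := by
  intro categories _
  show get_canned_response_py categories = get_canned_response_py_alt categories
  unfold get_canned_response_py get_canned_response_py_alt
  rw [pvBLoop_eq_best]
  simp only [pvALoop, pvBest]
  split_ifs <;> rfl
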